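-- pv_equiv track=rewrite | github.com/e-bel/drugintfinder | dif/ranker.py | __check_target_interactor_contradictions
-- ===== SOURCE A (Python) =====
-- def __check_target_interactor_contradictions(interactor_metadata: dict) -> bool:
--     """Check whether there are contradicting relation types between the interactor and target."""
--     tests = (('increases', 'decreases'),
--              ('increases', 'directly_decreases'),
--              ('decreases', 'directly_increases'),
--              ('directly_increases', 'directly_decreases'))
--
--     relations = interactor_metadata['relation_type']
--     contradictions = []
--     for test in tests:
--         contradiction_check = all(rel in relations for rel in test)
--         contradictions.append(contradiction_check)
--
--     return any(contradictions)
-- ===== SOURCE B (Python) =====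
-- def __check_target_interactor_contradictions(interactor_metadata: dict) -> bool:
--     """Check whether there are contradicting relation types between the interactor and target."""
--     relations = interactor_metadata['relation_type']
--     has_increase = any(r in relations for r in ('increases', 'directly_increases'))
--     has_decrease = any(r in relations for r in ('decreases', 'directly_decreases'))
--     return has_increase and has_decrease
-- ===== Notes on version B (the rewrite author's own statement) =====
-- stated objective: simpler
-- what changed: Replaces the enumerate-four-pairs loop that builds a list of per-pair checks with two grouped presence checks (any increasing relation present AND any decreasing relation present), since the four pairs are exactly the cross product of the two groups.
import Mathlib
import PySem

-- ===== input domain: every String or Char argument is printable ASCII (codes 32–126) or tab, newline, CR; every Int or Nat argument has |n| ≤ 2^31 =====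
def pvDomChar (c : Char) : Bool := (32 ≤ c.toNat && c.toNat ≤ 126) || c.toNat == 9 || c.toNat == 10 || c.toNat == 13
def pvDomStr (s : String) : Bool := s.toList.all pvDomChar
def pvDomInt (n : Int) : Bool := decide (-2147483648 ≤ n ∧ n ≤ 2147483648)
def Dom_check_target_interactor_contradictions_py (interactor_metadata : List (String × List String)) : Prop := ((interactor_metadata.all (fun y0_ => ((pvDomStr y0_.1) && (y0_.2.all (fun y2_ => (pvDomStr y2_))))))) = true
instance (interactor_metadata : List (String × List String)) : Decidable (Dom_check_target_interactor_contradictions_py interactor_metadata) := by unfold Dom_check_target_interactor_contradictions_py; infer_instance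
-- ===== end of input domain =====

-- B replaces the four-pair enumeration loop with two grouped presence checks (increasing vs decreasing relations); simpler decomposition, same result.


-- ===== PORT A =====
def check_target_interactor_contradictions_py (interactor_metadata : List (String × List String)) : Bool :=
  match (PySem.Dict.mk interactor_metadata).get? "relation_type" with
  | none => false  -- Python raises KeyError here; excluded by Pre_
  | some relations =>
    let tests : List (String × String) :=
      [("increases", "decreases"), ("increases", "directly_decreases"),
       ("decreases", "directly_increases"), ("directly_increases", "directly_decreases")]
    let contradictions := tests.foldl
      (fun acc test => acc ++ [relations.contains test.1 && relations.contains test.2]) []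
    contradictions.any id

-- ===== PORT B =====
def check_target_interactor_contradictions_py_alt (interactor_metadata : List (String × List String)) : Bool :=
  match (PySem.Dict.mk interactor_metadata).get? "relation_type" with
  | none => false  -- Python raises KeyError here; excluded by Pre_
  | some relations =>
    let has_increase := ["increases", "directly_increases"].any (fun r => relations.contains r)
    let has_decrease := ["decreases", "directly_decreases"].any (fun r => relations.contains r)
    has_increase && has_decrease

-- ===== PRECONDITION & SPEC =====
-- Pre_: the key 'relation_type' must be present, otherwise the Python A raises KeyError.
def Pre_check_target_interactor_contradictions_py (interactor_metadata : List (String × List String)) : Prop :=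
  ((interactor_metadata.map Prod.fst).contains "relation_type") = true
instance (interactor_metadata : List (String × List String)) : Decidable (Pre_check_target_interactor_contradictions_py interactor_metadata) := by unfold Pre_check_target_interactor_contradictions_py; infer_instance
def pvWitness_check_target_interactor_contradictions_py : (List (String × List String)) := [("relation_type", ["increases"])]

def Spec_check_target_interactor_contradictions_py (interactor_metadata : List (String × List String)) (out : Bool) : Prop := out = check_target_interactor_contradictions_py_alt interactor_metadata
instance (interactor_metadata : List (String × List String)) (out : Bool) : Decidable (Spec_check_target_interactor_contradictions_py interactor_metadata out) := by unfold Spec_check_target_interactor_contradictions_py; infer_instance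

-- ===== CLAIM (what is proved, stated in full; the proofs are below) =====
def Claim_equal_check_target_interactor_contradictions_py : Prop := ∀ (interactor_metadata : List (String × List String)), Dom_check_target_interactor_contradictions_py interactor_metadata → Pre_check_target_interactor_contradictions_py interactor_metadata → Spec_check_target_interactor_contradictions_py interactor_metadata (check_target_interactor_contradictions_py interactor_metadata)

-- ===== LEMMAS AND PROOFS =====

-- ===== VERDICT (by name: the statement is the Claim_ definition above) =====
theorem check_target_interactor_contradictions_py_spec : Claim_equal_check_target_interactor_contradictions_py := by
  intro md _ _
  unfold Spec_check_target_interactor_contradictions_py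
  unfold check_target_interactor_contradictions_py check_target_interactor_contradictions_py_alt
  cases h : (PySem.Dict.mk md).get? "relation_type" with
  | none => rfl
  | some relations =>
    simp only [List.foldl, List.any, List.contains, List.nil_append, List.cons_append]
    cases relations.elem "increases" <;> cases relations.elem "decreases" <;>
      cases relations.elem "directly_increases" <;> cases relations.elem "directly_decreases" <;> rfl
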